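-- pv_equiv track=rewrite | github.com/charankesari7-dotcom/turing_test_architecture | bfs_and_dfs_implementation.py | bfs
-- ===== SOURCE A (Python) =====
-- from collections import deque
--
-- def is_valid(m, c):
--
--     if m < 0 or c < 0 or m > 3 or c > 3:
--         return False
--
--     if m > 0 and c > m:
--         return False
--
--     m_right = 3 - m
--     c_right = 3 - c
--
--     if m_right > 0 and c_right > m_right:
--         return False
--
--     return True
--
-- def successors(state):
--
--     m, c, boat = state
--
--     moves = [(1,0),(2,0),(0,1),(0,2),(1,1)]
--
--     next_states = []
--
--     for move in moves:
--
--         if boat == 1: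
--             new_state = (m - move[0], c - move[1], 0)
--         else:
--             new_state = (m + move[0], c + move[1], 1)
--
--         if is_valid(new_state[0], new_state[1]):
--             next_states.append(new_state)
--
--     return next_states
--
-- def bfs(start, goal):
--
--     queue = deque([[start]])
--     visited = set()
--
--     while queue:
--
--         path = queue.popleft()
--         state = path[-1]
--
--         if state == goal:
--             return path
--
--         if state not in visited:
--             visited.add(state)
--
--             for next_state in successors(state):
--
--                 new_path = list(path)
--                 new_path.append(next_state)
--                 queue.append(new_path)
--
--     return None
-- ===== SOURCE B (Python) =====
-- from collections import deque
--
-- def is_valid(m, c):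
--     if m < 0 or c < 0 or m > 3 or c > 3:
--         return False
--     if m > 0 and c > m:
--         return False
--     m_right = 3 - m
--     c_right = 3 - c
--     if m_right > 0 and c_right > m_right:
--         return False
--     return True
--
-- def successors(state):
--     m, c, boat = state
--     moves = [(1,0),(2,0),(0,1),(0,2),(1,1)]
--     next_states = []
--     for move in moves:
--         if boat == 1:
--             new_state = (m - move[0], c - move[1], 0)
--         else:
--             new_state = (m + move[0], c + move[1], 1)
--         if is_valid(new_state[0], new_state[1]):
--             next_states.append(new_state)
--     return next_states
--
-- def bfs(start, goal):
--     # BFS over states with a parent map instead of a queue of whole paths.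
--     visited = {start}
--     parent = {}
--     queue = deque([start])
--     while queue:
--         state = queue.popleft()
--         if state == goal:
--             path = [state]
--             while path[0] != start:
--                 path.insert(0, parent[path[0]])
--             return path
--         for ns in successors(state):
--             if ns not in visited:
--                 visited.add(ns)
--                 parent[ns] = state
--                 queue.append(ns)
--     return None
-- ===== Notes on version B (the rewrite author's own statement) =====
-- stated objective: idiomatic
-- what changed: Replaces A's BFS over a queue of whole paths (copying the path for every enqueued successor, dedup at dequeue time) by the standard BFS over a queue of states with an enqueue-time visited set and a parent map from which the path is rebuilt backwards at the goal.
import Mathlib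
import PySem

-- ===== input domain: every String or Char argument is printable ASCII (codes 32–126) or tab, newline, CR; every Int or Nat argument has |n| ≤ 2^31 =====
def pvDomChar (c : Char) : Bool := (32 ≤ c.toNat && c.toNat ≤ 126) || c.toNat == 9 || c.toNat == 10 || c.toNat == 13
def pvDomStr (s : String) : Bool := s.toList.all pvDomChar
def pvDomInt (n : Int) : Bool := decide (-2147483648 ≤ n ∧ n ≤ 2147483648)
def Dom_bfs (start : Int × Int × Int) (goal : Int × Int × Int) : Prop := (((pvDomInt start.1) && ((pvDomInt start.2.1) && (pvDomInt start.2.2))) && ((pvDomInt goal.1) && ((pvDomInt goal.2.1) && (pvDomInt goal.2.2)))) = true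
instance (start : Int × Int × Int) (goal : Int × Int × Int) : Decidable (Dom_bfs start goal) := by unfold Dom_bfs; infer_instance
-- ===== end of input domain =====

-- B replaces A's queue-of-whole-paths BFS by the idiomatic parent-map BFS (queue of states,
-- enqueue-time visited marking, path rebuilt backwards from the parent dict at the goal).

-- ===== PORT A =====
def is_valid (m : Int) (c : Int) : Bool :=
  if m < 0 ∨ c < 0 ∨ m > 3 ∨ c > 3 then false
  else if m > 0 ∧ c > m then false
  else
    let m_right := 3 - m
    let c_right := 3 - c
    if m_right > 0 ∧ c_right > m_right then false
    else true

def successors (state : Int × Int × Int) : List (Int × Int × Int) :=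
  let m := state.1
  let c := state.2.1
  let boat := state.2.2
  let moves : List (Int × Int) := [(1,0),(2,0),(0,1),(0,2),(1,1)]
  moves.foldl (fun next_states move =>
    let new_state : Int × Int × Int :=
      if boat = 1 then (m - move.1, c - move.2, 0) else (m + move.1, c + move.2, 1)
    if is_valid new_state.1 new_state.2.1 then next_states ++ [new_state] else next_states) []

-- the while loop of A; fuel 1000 is enough for every input (proved via the invariant below)
def bfsLoop (goal : Int × Int × Int) :
    Nat → List (List (Int × Int × Int)) → PySem.Set (Int × Int × Int) →
    Option (List (Int × Int × Int))
  | 0, _, _ => none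
  | _ + 1, [], _ => none
  | fuel + 1, path :: rest, visited =>
    match PySem.List.pyGet? path (-1) with
    | none => none      -- path[-1] on an empty path: unreachable, every queued path is nonempty
    | some state =>
      if state = goal then some path
      else if state ∈ visited then bfsLoop goal fuel rest visited
      else
        bfsLoop goal fuel
          ((successors state).foldl (fun queue next_state => queue ++ [path ++ [next_state]]) rest)
          (PySem.Set.add visited state)

def bfs (start : Int × Int × Int) (goal : Int × Int × Int) : Option (List (Int × Int × Int)) :=
  bfsLoop goal 1000 [[start]] PySem.Set.empty

-- ===== PORT B =====
-- path reconstruction: path = [state]; while path[0] != start: path.insert(0, parent[path[0]])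
def rebuildLoop (start : Int × Int × Int) :
    Nat → PySem.Dict (Int × Int × Int) (Int × Int × Int) → List (Int × Int × Int) →
    Option (List (Int × Int × Int))
  | 0, _, _ => none
  | fuel + 1, parent, path =>
    match path with
    | [] => none        -- unreachable: path starts nonempty and only grows
    | cur :: _ =>
      if cur = start then some path
      else
        match parent.get? cur with
        | none => none  -- KeyError: unreachable, every non-start enqueued state has a parent
        | some pr => rebuildLoop start fuel parent (pr :: path)

-- the inner 'for ns in successors(state)' loop of B
def bfsExpand (state : Int × Int × Int) :
    List (Int × Int × Int) →
    List (Int × Int × Int) × PySem.Dict (Int × Int × Int) (Int × Int × Int) × PySem.Set (Int × Int × Int) →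
    List (Int × Int × Int) × PySem.Dict (Int × Int × Int) (Int × Int × Int) × PySem.Set (Int × Int × Int)
  | [], acc => acc
  | ns :: rest, (queue, parent, visited) =>
    if ns ∈ visited then bfsExpand state rest (queue, parent, visited)
    else bfsExpand state rest (queue ++ [ns], parent.insert ns state, PySem.Set.add visited ns)

def bfsAltLoop (start : Int × Int × Int) (goal : Int × Int × Int) :
    Nat → List (Int × Int × Int) → PySem.Dict (Int × Int × Int) (Int × Int × Int) →
    PySem.Set (Int × Int × Int) → Option (List (Int × Int × Int))
  | 0, _, _, _ => none
  | _ + 1, [], _, _ => none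
  | fuel + 1, state :: rest, parent, visited =>
    if state = goal then rebuildLoop start 1000 parent [state]
    else
      let r := bfsExpand state (successors state) (rest, parent, visited)
      bfsAltLoop start goal fuel r.1 r.2.1 r.2.2

def bfs_alt (start : Int × Int × Int) (goal : Int × Int × Int) : Option (List (Int × Int × Int)) :=
  bfsAltLoop start goal 1000 [start] PySem.Dict.empty (PySem.Set.ofList [start])

-- ===== PRECONDITION & SPEC =====
def Spec_bfs (start : Int × Int × Int) (goal : Int × Int × Int) (out : Option (List (Int × Int × Int))) : Prop := out = bfs_alt start goal
instance (start : Int × Int × Int) (goal : Int × Int × Int) (out : Option (List (Int × Int × Int))) : Decidable (Spec_bfs start goal out) := by unfold Spec_bfs; infer_instance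

-- ===== CLAIM (what is proved, stated in full; the proofs are below) =====
def Claim_equal_bfs : Prop := ∀ (start : Int × Int × Int) (goal : Int × Int × Int), Dom_bfs start goal → Spec_bfs start goal (bfs start goal)

-- ===== LEMMAS AND PROOFS =====

def ValidState (x : Int × Int × Int) : Prop :=
  is_valid x.1 x.2.1 = true ∧ (x.2.2 = 0 ∨ x.2.2 = 1)

theorem succ_eq_one (m c : Int) :
    successors (m, c, 1) =
      [(m-1,c,0),(m-2,c,0),(m,c-1,0),(m,c-2,0),(m-1,c-1,0)].filter
        (fun t => is_valid t.1 t.2.1) := by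
  simp only [successors, List.foldl, List.filter]
  norm_num
  split_ifs <;> simp_all

theorem succ_eq_other (m c b : Int) (hb : b ≠ 1) :
    successors (m, c, b) =
      [(m+1,c,1),(m+2,c,1),(m,c+1,1),(m,c+2,1),(m+1,c+1,1)].filter
        (fun t => is_valid t.1 t.2.1) := by
  simp only [successors, List.foldl, List.filter]
  simp only [hb, if_false]
  norm_num
  split_ifs <;> simp_all
theorem succ_cases (s : Int × Int × Int) :
    successors s =
      (if s.2.2 = 1 then [(s.1-1,s.2.1,(0:Int)),(s.1-2,s.2.1,0),(s.1,s.2.1-1,0),(s.1,s.2.1-2,0),(s.1-1,s.2.1-1,0)]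
       else [(s.1+1,s.2.1,(1:Int)),(s.1+2,s.2.1,1),(s.1,s.2.1+1,1),(s.1,s.2.1+2,1),(s.1+1,s.2.1+1,1)]).filter
        (fun t => is_valid t.1 t.2.1) := by
  obtain ⟨m, c, b⟩ := s
  by_cases hb : b = 1
  · subst hb; simpa using succ_eq_one m c
  · simpa [hb] using succ_eq_other m c b hb

theorem succ_valid {s t : Int × Int × Int} (h : t ∈ successors s) : ValidState t := by
  rw [succ_cases] at h
  rw [List.mem_filter] at h
  obtain ⟨hm, hv⟩ := h
  refine ⟨hv, ?_⟩
  split_ifs at hm <;> simp_all <;> rcases hm with h|h|h|h|h <;> subst h <;> simp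

theorem succ_len (s : Int × Int × Int) : (successors s).length ≤ 5 := by
  rw [succ_cases]
  split_ifs <;> exact List.length_filter_le _ _
def validList : List (Int × Int × Int) :=
  [(0,0,0),(0,0,1),(0,1,0),(0,1,1),(0,2,0),(0,2,1),(0,3,0),(0,3,1),
   (1,1,0),(1,1,1),(2,2,0),(2,2,1),
   (3,0,0),(3,0,1),(3,1,0),(3,1,1),(3,2,0),(3,2,1),(3,3,0),(3,3,1)]

theorem valid_mem {x : Int × Int × Int} (h : ValidState x) : x ∈ validList := by
  obtain ⟨m, c, b⟩ := x
  obtain ⟨hv, hb⟩ := h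
  simp only [is_valid] at hv
  split_ifs at hv with h1 h2 h3
  push Not at h1
  have hm : m = 0 ∨ m = 1 ∨ m = 2 ∨ m = 3 := by omega
  have hc : c = 0 ∨ c = 1 ∨ c = 2 ∨ c = 3 := by omega
  have hmc : (m = 0 ∨ c ≤ m) ∧ (m = 3 ∨ m ≤ c) := by
    constructor
    · by_cases h : m = 0
      · left; exact h
      · right; by_contra hcm; exact h2 ⟨by omega, by omega⟩
    · by_cases h : m = 3
      · left; exact h
      · right; by_contra hcm; exact h3 ⟨by omega, by omega⟩
  rcases hm with hm|hm|hm|hm <;> rcases hc with hc|hc|hc|hc <;>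
    rcases hb with hb|hb <;> subst hm hc hb <;> simp [validList] at hmc ⊢ <;> omega

theorem nodup_sub_length_le {l L : List (Int × Int × Int)} (h1 : l.Nodup)
    (h2 : ∀ x ∈ l, x ∈ L) : l.length ≤ L.length := by
  classical
  calc l.length = l.toFinset.card := (List.toFinset_card_of_nodup h1).symm
  _ ≤ L.toFinset.card := Finset.card_le_card (by intro x hx; simp at hx ⊢; exact h2 x hx)
  _ ≤ L.length := L.toFinset_card_le
def pending (vis : List (Int × Int × Int)) : List (Int × Int × Int) → List (Int × Int × Int)
  | [] => []
  | s :: es => if s ∈ vis then pending vis es else s :: pending (s :: vis) es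

theorem pending_congr {v1 v2 : List (Int × Int × Int)} (es : List (Int × Int × Int))
    (h : ∀ x, x ∈ v1 ↔ x ∈ v2) : pending v1 es = pending v2 es := by
  induction es generalizing v1 v2 with
  | nil => rfl
  | cons s es ih =>
    simp only [pending]
    by_cases hs : s ∈ v1
    · rw [if_pos hs, if_pos ((h s).mp hs)]; exact ih h
    · rw [if_neg hs, if_neg (fun hc => hs ((h s).mpr hc))]
      congr 1
      exact ih (by intro x; simp [h x])

theorem mem_pending_not_vis {vis es : List (Int × Int × Int)} {x : Int × Int × Int}
    (h : x ∈ pending vis es) : x ∉ vis := by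
  induction es generalizing vis with
  | nil => simp [pending] at h
  | cons s es ih =>
    simp only [pending] at h
    split_ifs at h with hs
    · exact ih h
    · rcases List.mem_cons.mp h with rfl | h
      · exact hs
      · intro hx; exact (ih h) (List.mem_cons_of_mem s hx)

theorem mem_pending {vis es : List (Int × Int × Int)} {x : Int × Int × Int}
    (hes : x ∈ es) (hv : x ∉ vis) : x ∈ pending vis es := by
  induction es generalizing vis with
  | nil => simp at hes
  | cons s es ih =>
    simp only [pending]
    rcases List.mem_cons.mp hes with rfl | hes'
    · rw [if_neg hv]; exact List.mem_cons_self
    · by_cases hs : s ∈ vis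
      · rw [if_pos hs]; exact ih hes' hv
      · rw [if_neg hs]
        by_cases hxs : x = s
        · subst hxs; exact List.mem_cons_self
        · exact List.mem_cons_of_mem s (ih hes' (by simp [hv, hxs]))

theorem pending_sub {vis es : List (Int × Int × Int)} {x : Int × Int × Int}
    (h : x ∈ pending vis es) : x ∈ es := by
  induction es generalizing vis with
  | nil => simp [pending] at h
  | cons s es ih =>
    simp only [pending] at h
    split_ifs at h with hs
    · exact List.mem_cons_of_mem s (ih h)
    · rcases List.mem_cons.mp h with rfl | h
      · exact List.mem_cons_self
      · exact List.mem_cons_of_mem s (ih h)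

theorem pending_nodup (vis es : List (Int × Int × Int)) : (pending vis es).Nodup := by
  induction es generalizing vis with
  | nil => exact List.nodup_nil
  | cons s es ih =>
    simp only [pending]
    split_ifs with hs
    · exact ih vis
    · refine List.nodup_cons.mpr ⟨fun hc => ?_, ih (s :: vis)⟩
      exact (mem_pending_not_vis hc) List.mem_cons_self

theorem pending_length_le (vis es : List (Int × Int × Int)) :
    (pending vis es).length ≤ es.length := by
  induction es generalizing vis with
  | nil => simp [pending]
  | cons s es ih =>
    simp only [pending]
    split_ifs with hs
    · exact le_trans (ih vis) (by simp)
    · simpa using ih (s :: vis)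

theorem pending_append (vis es new : List (Int × Int × Int)) :
    pending vis (es ++ new) = pending vis es ++ pending (pending vis es ++ vis) new := by
  induction es generalizing vis with
  | nil => simp [pending]
  | cons s es ih =>
    simp only [List.cons_append, pending]
    split_ifs with hs
    · exact ih vis
    · rw [ih (s :: vis)]
      simp only [List.cons_append, List.append_assoc, List.cons.injEq, true_and,
        List.append_right_inj]
      apply pending_congr
      intro x; simp; tauto
inductive Chain (start : Int × Int × Int) (par : PySem.Dict (Int × Int × Int) (Int × Int × Int)) :
    List (Int × Int × Int) → (Int × Int × Int) → Prop
  | base : Chain start par [start] start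
  | snoc {p s t} : Chain start par p s → t ≠ start → par.get? t = some s →
      Chain start par (p ++ [t]) t

theorem chain_last {start par p s} (h : Chain start par p s) : p.getLast? = some s := by
  induction h with
  | base => rfl
  | snoc h ht hp ih => simp

theorem rebuild_of_chain {start par p s} (h : Chain start par p s) :
    ∀ (f : Nat) (suffix : List (Int × Int × Int)), p.length ≤ f →
      rebuildLoop start f par (s :: suffix) = some (p.dropLast ++ s :: suffix) := by
  induction h with
  | base =>
    intro f suffix hf
    cases f with
    | zero => simp at hf
    | succ f => simp [rebuildLoop]
  | @snoc p s t hc ht hp ih =>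
    intro f suffix hf
    cases f with
    | zero => simp at hf
    | succ f =>
      simp only [rebuildLoop, if_neg ht, hp]
      rw [ih f (t :: suffix) (by simp at hf; omega)]
      have hlast : p.dropLast ++ [s] = p := by
        have := chain_last hc
        exact List.dropLast_append_getLast? s this
      rw [List.dropLast_concat]
      congr 1
      rw [← hlast]
      simp

theorem chain_insert {start par p s} (k v : Int × Int × Int) (h : Chain start par p s)
    (hk : k ∉ p) : Chain start (par.insert k v) p s := by
  induction h with
  | base => exact Chain.base
  | @snoc p s t hc ht hp ih =>
    simp only [List.mem_append, List.mem_singleton] at hk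
    push Not at hk
    refine Chain.snoc (ih hk.1) ht ?_
    rw [PySem.Dict.get?_insert_of_ne _ _ (Ne.symm hk.2)]
    exact hp
theorem chain_foldl_insert {start par p s} (st : Int × Int × Int)
    (l : List (Int × Int × Int)) (h : Chain start par p s) (hl : ∀ k ∈ l, k ∉ p) :
    Chain start (l.foldl (fun d n => d.insert n st) par) p s := by
  induction l generalizing par with
  | nil => exact h
  | cons k l ih =>
    simp only [List.foldl_cons]
    exact ih (chain_insert k st h (hl k List.mem_cons_self))
      (fun k' hk' => hl k' (List.mem_cons_of_mem k hk'))

theorem get?_foldl_insert_not_mem {par : PySem.Dict (Int × Int × Int) (Int × Int × Int)}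
    (st : Int × Int × Int) {l : List (Int × Int × Int)} {n : Int × Int × Int}
    (hn : n ∉ l) : (l.foldl (fun d m => d.insert m st) par).get? n = par.get? n := by
  induction l generalizing par with
  | nil => rfl
  | cons k l ih =>
    simp only [List.mem_cons] at hn
    push Not at hn
    simp only [List.foldl_cons]
    rw [ih hn.2, PySem.Dict.get?_insert_of_ne _ _ hn.1]

theorem get?_foldl_insert_mem {par : PySem.Dict (Int × Int × Int) (Int × Int × Int)}
    (st : Int × Int × Int) {l : List (Int × Int × Int)} {n : Int × Int × Int}
    (hnd : l.Nodup) (hn : n ∈ l) : (l.foldl (fun d m => d.insert m st) par).get? n = some st := by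
  induction l generalizing par with
  | nil => simp at hn
  | cons k l ih =>
    simp only [List.foldl_cons]
    rcases List.mem_cons.mp hn with rfl | hn'
    · rw [get?_foldl_insert_not_mem st (List.nodup_cons.mp hnd).1]
      exact PySem.Dict.get?_insert_self _ _ _
    · exact ih (List.nodup_cons.mp hnd).2 hn'

-- bfsExpand characterized by `pending`
theorem expand_eq (st : Int × Int × Int) (l q : List (Int × Int × Int))
    (par : PySem.Dict (Int × Int × Int) (Int × Int × Int)) (vis : List (Int × Int × Int)) :
    bfsExpand st l (q, par, vis) =
      (q ++ pending vis l, (pending vis l).foldl (fun d n => d.insert n st) par,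
        vis ++ pending vis l) := by
  induction l generalizing q par vis with
  | nil => simp [bfsExpand, pending]
  | cons ns l ih =>
    simp only [bfsExpand, pending]
    by_cases hns : ns ∈ vis
    · rw [if_pos hns, if_pos hns, ih]
    · rw [if_neg hns, if_neg hns]
      rw [PySem.Set.add_of_not_mem hns, ih]
      have hcongr : pending (vis ++ [ns]) l = pending (ns :: vis) l :=
        pending_congr l (by intro x; simp; tauto)
      rw [hcongr]
      simp [List.append_assoc]
theorem find_map_concat (p0 : List (Int × Int × Int)) {l : List (Int × Int × Int)}
    {s : Int × Int × Int} (hs : s ∈ l) :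
    (l.map (fun ns => p0 ++ [ns])).find? (fun p => p.getLast? == some s) = some (p0 ++ [s]) := by
  induction l with
  | nil => simp at hs
  | cons n l ih =>
    simp only [List.map_cons]
    by_cases hn : n = s
    · subst hn
      apply List.find?_cons_of_pos
      simp
    · rw [List.find?_cons_of_neg (by simp [hn])]
      refine ih ?_
      rcases List.mem_cons.mp hs with rfl | h
      · exact absurd rfl hn
      · exact h

structure BfsInv (start goal : Int × Int × Int) (qA : List (List (Int × Int × Int)))
    (visA : PySem.Set (Int × Int × Int)) (qB : List (Int × Int × Int))
    (par : PySem.Dict (Int × Int × Int) (Int × Int × Int))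
    (visB : PySem.Set (Int × Int × Int)) : Prop where
  nonempty : ∀ p ∈ qA, p ≠ []
  qB_eq : qB = pending visA (qA.filterMap List.getLast?)
  visB_mem : ∀ x, x ∈ visB ↔ x ∈ visA ∨ x ∈ qB
  start_mem : start ∈ visB
  goal_not : goal ∉ visA
  visA_nodup : visA.Nodup
  visA_sub : ∀ x ∈ visA, x = start ∨ ValidState x
  ends_sub : ∀ p ∈ qA, ∀ s, p.getLast? = some s → s = start ∨ ValidState s
  len_le : ∀ p ∈ qA, p.length ≤ visA.length + 1
  paths : ∀ s ∈ qB, ∃ p,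
    qA.find? (fun p => p.getLast? == some s) = some p ∧
    Chain start par p s ∧ (∀ x ∈ p, x ∈ visB)
theorem visA_len_le {start goal qA visA qB par visB}
    (inv : BfsInv start goal qA visA qB par visB) : visA.length ≤ 21 := by
  have := nodup_sub_length_le inv.visA_nodup
    (L := start :: validList)
    (fun x hx => by rcases inv.visA_sub x hx with rfl | hv
                    · exact List.mem_cons_self
                    · exact List.mem_cons_of_mem _ (valid_mem hv))
  simpa [validList] using this

theorem loop_eq (start goal : Int × Int × Int) (fA : Nat) :
    ∀ (fB : Nat) (qA : List (List (Int × Int × Int))) (visA : PySem.Set (Int × Int × Int))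
      (qB : List (Int × Int × Int)) (par : PySem.Dict (Int × Int × Int) (Int × Int × Int))
      (visB : PySem.Set (Int × Int × Int)),
      BfsInv start goal qA visA qB par visB →
      qA.length + 5 * (21 - visA.length) ≤ fA →
      qB.length + 5 * (21 - visA.length) ≤ fB →
      bfsLoop goal fA qA visA = bfsAltLoop start goal fB qB par visB := by
  induction fA with
  | zero =>
    intro fB qA visA qB par visB inv hfA hfB
    have hqA : qA = [] := by
      cases qA with
      | nil => rfl
      | cons p rest => simp at hfA
    subst hqA
    have hqB : qB = [] := by simpa [pending] using inv.qB_eq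
    subst hqB
    cases fB <;> rfl
  | succ fA ih =>
    intro fB qA visA qB par visB inv hfA hfB
    cases qA with
    | nil =>
      have hqB : qB = [] := by simpa [pending] using inv.qB_eq
      subst hqB
      cases fB <;> rfl
    | cons p0 rest =>
      have hp0ne : p0 ≠ [] := inv.nonempty p0 List.mem_cons_self
      cases hlast : p0.getLast? with
      | none => exact absurd (List.getLast?_eq_none_iff.mp hlast) hp0ne
      | some s0 =>
        have hes : (p0 :: rest).filterMap List.getLast? =
            s0 :: rest.filterMap List.getLast? := by
          rw [List.filterMap_cons, hlast]
        -- unfold A one step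
        simp only [bfsLoop, PySem.List.pyGet?_neg_one, hlast]
        by_cases hgoal : s0 = goal
        · -- A returns p0; B's queue head is s0 = goal and rebuilds the same path
          subst hgoal
          rw [if_pos rfl]
          have hnv : s0 ∉ visA := inv.goal_not
          have hqB : qB = s0 :: pending (s0 :: visA) (rest.filterMap List.getLast?) := by
            rw [inv.qB_eq, hes]; simp [pending, hnv]
          obtain ⟨p, hfind, hchain, hsub⟩ := inv.paths s0 (by rw [hqB]; exact List.mem_cons_self)
          have hp : p = p0 := by
            rw [List.find?_cons_of_pos (by simp [hlast])] at hfind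
            exact (Option.some.injEq _ _ ▸ hfind.symm)
          rw [hp] at hchain
          cases fB with
          | zero => rw [hqB] at hfB; simp at hfB
          | succ fB =>
            rw [hqB]
            simp only [bfsAltLoop, if_pos rfl]
            have hlen : p0.length ≤ 1000 := by
              have h1 := inv.len_le p0 List.mem_cons_self
              have h2 := visA_len_le inv
              omega
            rw [rebuild_of_chain hchain 1000 [] hlen]
            rw [List.dropLast_append_getLast? s0 (chain_last hchain)]
            simp
        · rw [if_neg hgoal]
          by_cases hvis : s0 ∈ visA
          · -- duplicate: A drops the path, B's state is unchanged
            rw [if_pos hvis]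
            have hqB : qB = pending visA (rest.filterMap List.getLast?) := by
              rw [inv.qB_eq, hes]; simp [pending, hvis]
            refine ih fB rest visA qB par visB ?_ (by simp at hfA ⊢; omega) (by omega)
            refine ⟨fun p hp => inv.nonempty p (List.mem_cons_of_mem _ hp), hqB,
              inv.visB_mem, inv.start_mem, inv.goal_not, inv.visA_nodup, inv.visA_sub,
              fun p hp => inv.ends_sub p (List.mem_cons_of_mem _ hp),
              fun p hp => inv.len_le p (List.mem_cons_of_mem _ hp), ?_⟩
            intro s hs
            have hsqB : s ∈ qB := hs
            obtain ⟨p, hfind, hchain, hsub⟩ := inv.paths s hsqB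
            have hsnv : s ∉ visA := by
              rw [inv.qB_eq] at hsqB; exact mem_pending_not_vis hsqB
            have hne : s ≠ s0 := fun h => hsnv (h ▸ hvis)
            rw [List.find?_cons_of_neg (by simp [hlast]; exact fun h => hne h.symm)] at hfind
            exact ⟨p, hfind, hchain, hsub⟩
          · -- fresh state: A expands p0, B dequeues s0 and expands it too
            rw [if_neg hvis]
            have hvA : PySem.Set.add visA s0 = visA ++ [s0] := PySem.Set.add_of_not_mem hvis
            have hqB : qB = s0 :: pending (s0 :: visA) (rest.filterMap List.getLast?) := by
              rw [inv.qB_eq, hes]; simp [pending, hvis]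
            have hs0vB : s0 ∈ visB :=
              (inv.visB_mem s0).mpr (Or.inr (by rw [hqB]; exact List.mem_cons_self))
            have hsA : s0 = start ∨ ValidState s0 := inv.ends_sub p0 List.mem_cons_self s0 hlast
            have hvA'nodup : (visA ++ [s0]).Nodup := by
              simp only [List.nodup_append, List.nodup_singleton, true_and]
              refine ⟨inv.visA_nodup, ?_⟩
              intro a ha b hb
              rcases List.mem_singleton.mp hb with rfl
              intro h; exact hvis (h ▸ ha)
            have hvA'sub : ∀ x ∈ visA ++ [s0], x ∈ start :: validList := by
              intro x hx
              rcases List.mem_append.mp hx with hx | hx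
              · rcases inv.visA_sub x hx with rfl | hv
                · exact List.mem_cons_self
                · exact List.mem_cons_of_mem _ (valid_mem hv)
              · rcases List.mem_singleton.mp hx with rfl
                rcases hsA with rfl | hv
                · exact List.mem_cons_self
                · exact List.mem_cons_of_mem _ (valid_mem hv)
            have hlen20 : visA.length ≤ 20 := by
              have := nodup_sub_length_le hvA'nodup hvA'sub
              simp [validList] at this
              omega
            have hmapA : (successors s0).foldl (fun q ns => q ++ [p0 ++ [ns]]) rest =
                rest ++ (successors s0).map (fun ns => p0 ++ [ns]) :=
              PySem.List.foldl_append_singleton_eq_map _ _ _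
            rw [hmapA]
            have hqBlen : 1 ≤ qB.length := by rw [hqB]; simp
            cases fB with
            | zero => omega
            | succ fB =>
              rw [hqB]
              simp only [bfsAltLoop, if_neg hgoal]
              rw [expand_eq]
              simp only [hvA]
              have hnewends : ((successors s0).map (fun ns => p0 ++ [ns])).filterMap
                  List.getLast? = successors s0 := by
                simp [List.filterMap_map, Function.comp_def]
              have hqBtail : pending (visA ++ [s0]) (rest.filterMap List.getLast?) =
                  pending (s0 :: visA) (rest.filterMap List.getLast?) :=
                pending_congr _ (by intro x; simp; tauto)
              have hpnew : pending (pending (s0 :: visA) (rest.filterMap List.getLast?) ++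
                  (visA ++ [s0])) (successors s0) = pending visB (successors s0) := by
                apply pending_congr
                intro x
                rw [inv.visB_mem x, hqB]
                simp
                tauto
              refine ih fB _ _ _ _ _ ?_ ?_ ?_
              · constructor
                · -- nonempty
                  intro p hp
                  rcases List.mem_append.mp hp with hp | hp
                  · exact inv.nonempty p (List.mem_cons_of_mem _ hp)
                  · obtain ⟨ns, _, rfl⟩ := List.mem_map.mp hp
                    simp
                · -- qB_eq
                  dsimp only
                  rw [List.filterMap_append, hnewends, pending_append, hqBtail, hpnew]
                · -- visB_mem
                  intro x
                  constructor
                  · intro hx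
                    rcases List.mem_append.mp hx with hx | hx
                    · rcases (inv.visB_mem x).mp hx with hx | hx
                      · exact Or.inl (List.mem_append.mpr (Or.inl hx))
                      · rw [hqB] at hx
                        rcases List.mem_cons.mp hx with rfl | hx
                        · exact Or.inl (by simp)
                        · exact Or.inr (List.mem_append.mpr (Or.inl hx))
                    · exact Or.inr (List.mem_append.mpr (Or.inr hx))
                  · intro hx
                    rcases hx with hx | hx
                    · rcases List.mem_append.mp hx with hx | hx
                      · exact List.mem_append.mpr
                          (Or.inl ((inv.visB_mem x).mpr (Or.inl hx)))
                      · rcases List.mem_singleton.mp hx with rfl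
                        exact List.mem_append.mpr (Or.inl hs0vB)
                    · rcases List.mem_append.mp hx with hx | hx
                      · exact List.mem_append.mpr (Or.inl ((inv.visB_mem x).mpr
                          (Or.inr (by rw [hqB]; exact List.mem_cons_of_mem _ hx))))
                      · exact List.mem_append.mpr (Or.inr hx)
                · -- start_mem
                  exact List.mem_append.mpr (Or.inl inv.start_mem)
                · -- goal_not
                  intro hg
                  rcases List.mem_append.mp hg with hg | hg
                  · exact inv.goal_not hg
                  · exact hgoal (List.mem_singleton.mp hg).symm
                · exact hvA'nodup
                · -- visA_sub
                  intro x hx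
                  rcases List.mem_append.mp hx with hx | hx
                  · exact inv.visA_sub x hx
                  · rcases List.mem_singleton.mp hx with rfl
                    exact hsA
                · -- ends_sub
                  intro p hp s hs
                  rcases List.mem_append.mp hp with hp | hp
                  · exact inv.ends_sub p (List.mem_cons_of_mem _ hp) s hs
                  · obtain ⟨ns, hns, rfl⟩ := List.mem_map.mp hp
                    simp at hs
                    exact Or.inr (hs ▸ succ_valid hns)
                · -- len_le
                  intro p hp
                  rcases List.mem_append.mp hp with hp | hp
                  · have := inv.len_le p (List.mem_cons_of_mem _ hp)
                    simp
                    omega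
                  · obtain ⟨ns, _, rfl⟩ := List.mem_map.mp hp
                    have := inv.len_le p0 List.mem_cons_self
                    simp
                    omega
                · -- paths
                  intro s hs
                  rcases List.mem_append.mp hs with hsT | hsN
                  · have hsqB : s ∈ qB := by rw [hqB]; exact List.mem_cons_of_mem _ hsT
                    obtain ⟨p, hfind, hchain, hsub⟩ := inv.paths s hsqB
                    have hnd : qB.Nodup := by rw [inv.qB_eq]; exact pending_nodup _ _
                    rw [hqB] at hnd
                    have hne : s ≠ s0 := by
                      intro h; subst h
                      exact (List.nodup_cons.mp hnd).1 hsT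
                    rw [List.find?_cons_of_neg
                      (by simp [hlast]; exact fun h => hne h.symm)] at hfind
                    refine ⟨p, ?_, ?_, ?_⟩
                    · rw [List.find?_append, hfind]; rfl
                    · refine chain_foldl_insert s0 _ hchain ?_
                      intro k hk hkp
                      exact (mem_pending_not_vis hk) (hsub k hkp)
                    · intro x hx
                      exact List.mem_append.mpr (Or.inl (hsub x hx))
                  · have hsnB : s ∉ visB := mem_pending_not_vis hsN
                    have hssucc : s ∈ successors s0 := pending_sub hsN
                    have hrestnone : rest.find? (fun p => p.getLast? == some s) = none := by
                      apply List.find?_eq_none.mpr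
                      intro p' hp' hpred
                      simp at hpred
                      have hses : s ∈ rest.filterMap List.getLast? :=
                        List.mem_filterMap.mpr ⟨p', hp', hpred⟩
                      have hsnvA : s ∉ visA := fun h => hsnB ((inv.visB_mem s).mpr (Or.inl h))
                      have : s ∈ qB := by
                        rw [inv.qB_eq, hes]
                        exact mem_pending (List.mem_cons_of_mem _ hses) hsnvA
                      exact hsnB ((inv.visB_mem s).mpr (Or.inr this))
                    obtain ⟨p, hfind0, hchain0, hsub0⟩ :=
                      inv.paths s0 (by rw [hqB]; exact List.mem_cons_self)
                    have hp : p = p0 := by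
                      rw [List.find?_cons_of_pos (by simp [hlast])] at hfind0
                      exact (Option.some.injEq _ _ ▸ hfind0.symm)
                    rw [hp] at hchain0 hsub0
                    refine ⟨p0 ++ [s], ?_, ?_, ?_⟩
                    · rw [List.find?_append, hrestnone, find_map_concat p0 hssucc]; rfl
                    · refine Chain.snoc (chain_foldl_insert s0 _ hchain0 ?_)
                        (fun h => hsnB (h ▸ inv.start_mem))
                        (get?_foldl_insert_mem s0 (pending_nodup _ _) hsN)
                      intro k hk hkp
                      exact (mem_pending_not_vis hk) (hsub0 k hkp)
                    · intro x hx
                      rcases List.mem_append.mp hx with hx | hx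
                      · exact List.mem_append.mpr (Or.inl (hsub0 x hx))
                      · rcases List.mem_singleton.mp hx with rfl
                        exact List.mem_append.mpr (Or.inr hsN)
              · -- fuel bound for A
                have h5 := succ_len s0
                simp at hfA ⊢
                omega
              · -- fuel bound for B
                have h5 := succ_len s0
                have hple := pending_length_le visB (successors s0)
                rw [hqB] at hfB
                simp at hfB ⊢
                omega
theorem bfs_eq_alt (start goal : Int × Int × Int) : bfs start goal = bfs_alt start goal := by
  unfold bfs bfs_alt
  have hof : PySem.Set.ofList [start] = [start] := rfl
  rw [hof]
  apply loop_eq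
  · constructor
    · intro p hp
      rcases List.mem_singleton.mp hp with rfl
      simp
    · simp [pending, PySem.Set.empty]
    · intro x
      simp [PySem.Set.empty]
    · exact List.mem_singleton.mpr rfl
    · simp [PySem.Set.empty]
    · simp [PySem.Set.empty]
    · intro x hx
      simp [PySem.Set.empty] at hx
    · intro p hp s hs
      rcases List.mem_singleton.mp hp with rfl
      simp at hs
      exact Or.inl hs.symm
    · intro p hp
      rcases List.mem_singleton.mp hp with rfl
      simp [PySem.Set.empty]
    · intro s hs
      rcases List.mem_singleton.mp hs with rfl
      refine ⟨[s], ?_, Chain.base, ?_⟩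
      · exact List.find?_cons_of_pos (by simp)
      · intro x hx
        rcases List.mem_singleton.mp hx with rfl
        exact List.mem_singleton.mpr rfl
  · simp [PySem.Set.empty]
  · simp [PySem.Set.empty]

-- ===== VERDICT (by name: the statement is the Claim_ definition above) =====
theorem bfs_spec : Claim_equal_bfs := by
  intro start goal _
  unfold Spec_bfs
  exact bfs_eq_alt start goal
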